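-- pv_equiv track=rewrite | github.com/vinithbraj/openfabric | src/aor_runtime/runtime/response_renderer.py | _break_sql_clauses
-- ===== SOURCE A (Python) =====
-- SQL_DISPLAY_CLAUSES = [
--     "LEFT OUTER JOIN",
--     "RIGHT OUTER JOIN",
--     "FULL OUTER JOIN",
--     "INNER JOIN",
--     "LEFT JOIN",
--     "RIGHT JOIN",
--     "FULL JOIN",
--     "CROSS JOIN",
--     "GROUP BY",
--     "ORDER BY",
--     "UNION ALL",
--     "SELECT",
--     "FROM",
--     "JOIN",
--     "WHERE",
--     "HAVING",
--     "LIMIT",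
--     "OFFSET",
--     "UNION",
-- ]
--
-- def _break_sql_clauses(sql: str) -> list[str]:
--     """Handle the internal break sql clauses helper path for this module.
--
--     Inputs:
--         Receives sql for this function; type hints and validators define accepted shapes.
--
--     Returns:
--         Returns the computed value described by the function name and type hints.
--
--     Used by:
--         Used by planning, execution, validation, and presentation code paths that import or call aor_runtime.runtime.response_renderer._break_sql_clauses.
--     """
--     lines: list[str] = []
--     current: list[str] = []
--     index = 0
--     quote: str | None = None
--     while index < len(sql):
--         char = sql[index]
--         if char in {"'", '"'}:
--             if quote is None:
--                 quote = char
--             elif quote == char: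
--                 quote = None
--             current.append(char)
--             index += 1
--             continue
--         if quote is None:
--             clause = _match_sql_clause(sql, index)
--             if clause:
--                 current_text = "".join(current).strip()
--                 if current_text:
--                     lines.append(current_text)
--                     current = []
--                 current.append(sql[index : index + len(clause)])
--                 index += len(clause)
--                 continue
--         current.append(char)
--         index += 1
--     tail = "".join(current).strip()
--     if tail:
--         lines.append(tail)
--     return lines or [sql]
--
-- def _match_sql_clause(sql: str, index: int) -> str | None:
--     """Handle the internal match sql clause helper path for this module.
--
--     Inputs:
--         Receives sql, index for this function; type hints and validators define accepted shapes.
--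
--     Returns:
--         Returns the computed value described by the function name and type hints.
--
--     Used by:
--         Used by planning, execution, validation, and presentation code paths that import or call aor_runtime.runtime.response_renderer._match_sql_clause.
--     """
--     for clause in SQL_DISPLAY_CLAUSES:
--         end = index + len(clause)
--         if sql[index:end].upper() != clause:
--             continue
--         previous = sql[index - 1] if index > 0 else ""
--         following = sql[end] if end < len(sql) else ""
--         if previous and (previous.isalnum() or previous == "_"):
--             continue
--         if following and (following.isalnum() or following == "_"):
--             continue
--         if index == 0:
--             return None
--         return clause
--     return None
-- ===== SOURCE B (Python) =====
-- SQL_DISPLAY_CLAUSES = [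
--     "LEFT OUTER JOIN",
--     "RIGHT OUTER JOIN",
--     "FULL OUTER JOIN",
--     "INNER JOIN",
--     "LEFT JOIN",
--     "RIGHT JOIN",
--     "FULL JOIN",
--     "CROSS JOIN",
--     "GROUP BY",
--     "ORDER BY",
--     "UNION ALL",
--     "SELECT",
--     "FROM",
--     "JOIN",
--     "WHERE",
--     "HAVING",
--     "LIMIT",
--     "OFFSET",
--     "UNION",
-- ]
--
--
-- def _is_word(ch: str) -> bool:
--     return ch.isalnum() or ch == "_"
--
--
-- def _clause_at(sql: str, upper: str, i: int) -> str | None: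
--     # Word-boundary check on the left is clause-independent, so it is hoisted here.
--     if _is_word(sql[i - 1]):
--         return None
--     n = len(sql)
--     for cl in SQL_DISPLAY_CLAUSES:
--         end = i + len(cl)
--         if upper.startswith(cl, i) and not (end < n and _is_word(sql[end])):
--             return cl
--     return None
--
--
-- def _break_sql_clauses(sql: str) -> list[str]:
--     # Outer loop per output segment; inner scan finds the next clause start,
--     # then the segment is cut directly out of sql by slicing.  No character
--     # accumulator is maintained.
--     upper = sql.upper()
--     n = len(sql)
--     lines: list[str] = []
--     quote: str | None = None
--     start = 0
--     i = 0
--     while True: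
--         cl = None
--         while i < n:
--             ch = sql[i]
--             if ch == "'" or ch == '"':
--                 if quote is None:
--                     quote = ch
--                 elif quote == ch:
--                     quote = None
--                 i += 1
--             elif quote is None and i > 0:
--                 cl = _clause_at(sql, upper, i)
--                 if cl is not None:
--                     break
--                 i += 1
--             else:
--                 i += 1
--         if cl is None:
--             break
--         seg = sql[start:i].strip()
--         if seg:
--             lines.append(seg)
--         start = i
--         i += len(cl)
--     tail = sql[start:].strip()
--     if tail:
--         lines.append(tail)
--     return lines or [sql]
-- ===== Notes on version B (the rewrite author's own statement) =====
-- stated objective: faster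
-- what changed: A runs one flat scan that copies every character into a `current` accumulator and joins/flushes it at each clause match; B uses an outer loop per output line whose inner scan (with the clause-independent left-boundary test hoisted out of the clause loop, matching against one pre-uppercased copy) only locates the next clause-start index, and each line is cut directly out of sql by slicing between consecutive cut points, eliminating the per-character list appends and join copies.
import Mathlib
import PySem

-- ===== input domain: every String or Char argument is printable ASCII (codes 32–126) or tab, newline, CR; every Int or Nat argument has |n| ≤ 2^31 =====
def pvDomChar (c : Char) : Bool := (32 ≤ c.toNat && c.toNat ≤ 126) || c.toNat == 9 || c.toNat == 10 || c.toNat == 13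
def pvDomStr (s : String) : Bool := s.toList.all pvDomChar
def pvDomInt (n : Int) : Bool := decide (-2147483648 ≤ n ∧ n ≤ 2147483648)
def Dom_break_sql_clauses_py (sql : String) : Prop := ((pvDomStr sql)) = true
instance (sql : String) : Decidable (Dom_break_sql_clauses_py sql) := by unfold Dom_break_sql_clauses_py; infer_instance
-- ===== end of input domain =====

-- B replaces A's accumulate-characters-then-flush scan by an outer loop per output
-- segment: an inner scan only finds the next clause-start index (matching a single
-- pre-uppercased copy, with the clause-independent left-boundary test hoisted out of the
-- clause loop), and each line is cut directly out of sql by slicing between consecutive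
-- cut points, avoiding the per-character accumulator appends and joins (measured faster by
-- a timing run; same return value).

-- shared module-level data/helpers (both Pythons carry the same SQL_DISPLAY_CLAUSES
-- constant and the isalnum-or-underscore word test)
def sqlClauses : List (List Char) :=
  ["LEFT OUTER JOIN".toList, "RIGHT OUTER JOIN".toList, "FULL OUTER JOIN".toList,
   "INNER JOIN".toList, "LEFT JOIN".toList, "RIGHT JOIN".toList, "FULL JOIN".toList,
   "CROSS JOIN".toList, "GROUP BY".toList, "ORDER BY".toList, "UNION ALL".toList,
   "SELECT".toList, "FROM".toList, "JOIN".toList, "WHERE".toList, "HAVING".toList,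
   "LIMIT".toList, "OFFSET".toList, "UNION".toList]

def isWordChar (c : Char) : Bool := PySem.Chars.isalnum c || c == '_'

-- ===== PORT A =====

-- _match_sql_clause: loop over SQL_DISPLAY_CLAUSES.  `previous`/`following` are one-char
-- strings (truthy iff they exist), so `if previous and (...)` is the guarded conjunction
-- below; the guard makes the `getD` default unreachable.
def matchLoopA (sql : List Char) (index : Nat) : List (List Char) → Option (List Char)
  | [] => none
  | clause :: rest =>
    if PySem.Chars.upper (PySem.List.slice sql (some (index : Int))
        (some ((index + clause.length : Nat) : Int))) ≠ clause then
      matchLoopA sql index rest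
    else if 0 < index ∧ isWordChar (sql.getD (index - 1) ' ') then
      matchLoopA sql index rest
    else if index + clause.length < sql.length ∧ isWordChar (sql.getD (index + clause.length) ' ') then
      matchLoopA sql index rest
    else if index = 0 then none else some clause

theorem matchLoopA_mem (sql : List Char) (index : Nat) (cl : List (List Char))
    (c : List Char) (h : matchLoopA sql index cl = some c) : c ∈ cl := by
  induction cl with
  | nil => simp [matchLoopA] at h
  | cons a t ih =>
    rw [matchLoopA] at h
    split_ifs at h <;>
      first
        | exact List.mem_cons_of_mem _ (ih h)
        | (injection h with h'; subst h'; simp)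

theorem matchLoopA_pos (sql : List Char) (index : Nat) (c : List Char)
    (h : matchLoopA sql index sqlClauses = some c) : 0 < c.length := by
  have hmem := matchLoopA_mem sql index sqlClauses c h
  have hall : sqlClauses.all (fun x => decide (0 < x.length)) = true := by decide
  simpa using List.all_eq_true.mp hall c hmem

-- _break_sql_clauses main loop: state (lines, current, index, quote); `current` is the
-- joined pending text as a list of chars; `if clause:` is the `.isSome` test.
def loopA (sql : List Char) (lines : List (List Char)) (current : List Char)
    (index : Nat) (quote : Option Char) : List (List Char) :=
  if h : index < sql.length then
    if sql[index]'h = '\'' ∨ sql[index]'h = '"' then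
      loopA sql lines (current ++ [sql[index]'h]) (index + 1)
        (match quote with
         | none => some (sql[index]'h)
         | some q => if q = sql[index]'h then none else some q)
    else if hcl : (if quote = none then matchLoopA sql index sqlClauses else none).isSome then
      let clause := (if quote = none then matchLoopA sql index sqlClauses else none).get hcl
      let text := PySem.Chars.strip current
      loopA sql (if text = [] then lines else lines ++ [text])
        ((if text = [] then current else []) ++
          PySem.List.slice sql (some (index : Int)) (some ((index + clause.length : Nat) : Int)))
        (index + clause.length) quote
    else loopA sql lines (current ++ [sql[index]'h]) (index + 1) quote
  else
    let tail := PySem.Chars.strip current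
    if tail = [] then lines else lines ++ [tail]
termination_by sql.length - index
decreasing_by
  · omega
  · by_cases hq : quote = none
    · subst hq
      simp only [reduceDIte] at hcl ⊢
      have := matchLoopA_pos sql index _ (Option.some_get hcl).symm
      omega
    · exfalso
      rw [dif_neg hq] at hcl
      simp at hcl
  · omega

def break_sql_clauses_py (sql : String) : List String :=
  let lines := loopA sql.toList [] [] 0 none
  if lines = [] then [sql] else lines.map String.ofList

-- ===== PORT B =====

-- the `for cl in SQL_DISPLAY_CLAUSES` loop of _clause_at; `upper.startswith(cl, i)` is
-- startswith on the suffix `upper.drop i` (exact: callers pass 0 ≤ i < len)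
def findClauseB (sql upper : List Char) (i : Nat) : List (List Char) → Option (List Char)
  | [] => none
  | cl :: rest =>
    if PySem.Chars.startswith (upper.drop i) cl ∧
        ¬ (i + cl.length < sql.length ∧ isWordChar (sql.getD (i + cl.length) ' ')) then
      some cl
    else findClauseB sql upper i rest

-- _clause_at: clause-independent left-boundary test hoisted before the loop; called
-- only with 0 < i, so the `getD` default is unreachable (Source B indexes sql[i-1] directly)
def clauseAtB (sql upper : List Char) (i : Nat) : Option (List Char) :=
  if isWordChar (sql.getD (i - 1) ' ') then none else findClauseB sql upper i sqlClauses

-- inner `while i < n` scan: advances i (and the quote state) until the next clause start;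
-- returns (i, quote, found clause or none-at-end)
def scanB (sql upper : List Char) (i : Nat) (quote : Option Char) :
    Nat × Option Char × Option (List Char) :=
  if h : i < sql.length then
    if sql[i]'h = '\'' ∨ sql[i]'h = '"' then
      scanB sql upper (i + 1)
        (match quote with
         | none => some (sql[i]'h)
         | some q => if q = sql[i]'h then none else some q)
    else if quote = none ∧ 0 < i then
      match clauseAtB sql upper i with
      | some cl => (i, quote, some cl)
      | none => scanB sql upper (i + 1) quote
    else scanB sql upper (i + 1) quote
  else (i, quote, none)
termination_by sql.length - i

-- outer `while True` loop: one iteration per emitted line; `start` is the segment start,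
-- the line is sliced out of sql directly (`sql[start:i]` / the tail `sql[start:]`).
-- The dite is only a totality guard (a successful scan always advances past i, proved in
-- the lemmas below); the else-branch is unreachable.
def outerB (sql upper : List Char) (lines : List (List Char)) (start i : Nat)
    (quote : Option Char) : List (List Char) :=
  match scanB sql upper i quote with
  | (j, q', some cl) =>
    let seg := PySem.Chars.strip (PySem.List.slice sql (some (start : Int)) (some (j : Int)))
    if h : sql.length - (j + cl.length) < sql.length - i then
      outerB sql upper (if seg = [] then lines else lines ++ [seg]) j (j + cl.length) q'
    else if seg = [] then lines else lines ++ [seg]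
  | (_, _, none) =>
    let tail := PySem.Chars.strip (PySem.List.slice sql (some (start : Int)) none)
    if tail = [] then lines else lines ++ [tail]
termination_by sql.length - i
decreasing_by
  exact h

def break_sql_clauses_py_alt (sql : String) : List String :=
  let cs := sql.toList
  let u := PySem.Chars.upper cs
  let lines := outerB cs u [] 0 0 none
  if lines = [] then [sql] else lines.map String.ofList

-- ===== PRECONDITION & SPEC =====
def Spec_break_sql_clauses_py (sql : String) (out : List String) : Prop := out = break_sql_clauses_py_alt sql
instance (sql : String) (out : List String) : Decidable (Spec_break_sql_clauses_py sql out) := by unfold Spec_break_sql_clauses_py; infer_instance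

-- ===== CLAIM (what is proved, stated in full; the proofs are below) =====
def Claim_equal_break_sql_clauses_py : Prop := ∀ (sql : String), Dom_break_sql_clauses_py sql → Spec_break_sql_clauses_py sql (break_sql_clauses_py sql)

-- ===== LEMMAS AND PROOFS =====

theorem findClauseB_mem (sql upper : List Char) (i : Nat) (cl : List (List Char))
    (c : List Char) (h : findClauseB sql upper i cl = some c) : c ∈ cl := by
  induction cl with
  | nil => simp [findClauseB] at h
  | cons a t ih =>
    rw [findClauseB] at h
    split_ifs at h
    · injection h with h'; subst h'; simp
    · exact List.mem_cons_of_mem _ (ih h)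

theorem clauseAtB_pos (sql upper : List Char) (i : Nat) (c : List Char)
    (h : clauseAtB sql upper i = some c) : 0 < c.length := by
  unfold clauseAtB at h
  split_ifs at h
  have hmem := findClauseB_mem sql upper i sqlClauses c h
  have hall : sqlClauses.all (fun x => decide (0 < x.length)) = true := by decide
  simpa using List.all_eq_true.mp hall c hmem

-- bounds of a successful scan
theorem scanB_some (sql upper : List Char) :
    ∀ (m i : Nat) (q : Option Char) (j : Nat) (q' : Option Char) (cl : List Char),
      sql.length - i ≤ m → scanB sql upper i q = (j, q', some cl) →
      i ≤ j ∧ j < sql.length ∧ 0 < cl.length := by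
  intro m
  induction m with
  | zero =>
    intro i q j q' cl hm h
    rw [scanB, dif_neg (by omega)] at h
    simp at h
  | succ m ih =>
    intro i q j q' cl hm h
    by_cases hi : i < sql.length
    · rw [scanB, dif_pos hi] at h
      by_cases hc : sql[i] = '\'' ∨ sql[i] = '"'
      · rw [if_pos hc] at h
        have := ih (i + 1) _ j q' cl (by omega) h
        omega
      · rw [if_neg hc] at h
        by_cases hq : q = none ∧ 0 < i
        · rw [if_pos hq] at h
          cases hca : clauseAtB sql upper i with
          | some c0 =>
            rw [hca] at h
            injection h with h1 h2
            injection h2 with h2 h3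
            injection h3 with h3
            subst h1; subst h3
            exact ⟨le_refl _, hi, clauseAtB_pos sql upper i c0 hca⟩
          | none =>
            rw [hca] at h
            have := ih (i + 1) _ j q' cl (by omega) h
            omega
        · rw [if_neg hq] at h
          have := ih (i + 1) _ j q' cl (by omega) h
          omega
    · rw [scanB, dif_neg hi] at h
      simp at h

-- proof-side fused view: A's accumulator loop with B's clause matcher plugged in
def Fspec (sql upper : List Char) (cur : List Char) (i : Nat) (q : Option Char) :
    List (List Char) :=
  if h : i < sql.length then
    if sql[i]'h = '\'' ∨ sql[i]'h = '"' then
      Fspec sql upper (cur ++ [sql[i]'h]) (i + 1)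
        (match q with
         | none => some (sql[i]'h)
         | some c => if c = sql[i]'h then none else some c)
    else if q = none ∧ 0 < i then
      match hcl : clauseAtB sql upper i with
      | some cl =>
        let t := PySem.Chars.strip cur
        (if t = [] then [] else [t]) ++
          Fspec sql upper ((if t = [] then cur else []) ++
              PySem.List.slice sql (some (i : Int)) (some ((i + cl.length : Nat) : Int)))
            (i + cl.length) q
      | none => Fspec sql upper (cur ++ [sql[i]'h]) (i + 1) q
    else Fspec sql upper (cur ++ [sql[i]'h]) (i + 1) q
  else
    let t := PySem.Chars.strip cur
    if t = [] then [] else [t]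
termination_by sql.length - i
decreasing_by
  · omega
  · have := clauseAtB_pos sql upper i cl hcl
    omega
  · omega
  · omega

theorem matchLoopA_zero (sql : List Char) :
    ∀ cl, matchLoopA sql 0 cl = none := by
  intro cl
  induction cl with
  | nil => rfl
  | cons a t ih =>
    rw [matchLoopA]
    split_ifs <;> first | exact ih | rfl | omega

theorem upper_slice_eq_iff (sql clause : List Char) (i : Nat) :
    PySem.Chars.upper (PySem.List.slice sql (some (i : Int))
        (some ((i + clause.length : Nat) : Int))) = clause ↔
      PySem.Chars.startswith ((PySem.Chars.upper sql).drop i) clause = true := by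
  rw [PySem.List.slice_natCast]
  have hd : i + clause.length - i = clause.length := by omega
  rw [hd]
  simp only [PySem.Chars.startswith, PySem.Chars.upper, List.isPrefixOf_iff_prefix,
    List.prefix_iff_eq_take, ← List.map_drop, ← List.map_take]
  exact eq_comm

theorem matchA_eq (sql : List Char) (i : Nat) (hi0 : 0 < i) :
    matchLoopA sql i sqlClauses = clauseAtB sql (PySem.Chars.upper sql) i := by
  unfold clauseAtB
  by_cases hw : isWordChar (sql.getD (i - 1) ' ') = true
  · rw [if_pos hw]
    show matchLoopA sql i sqlClauses = none
    induction sqlClauses with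
    | nil => rfl
    | cons a t ih =>
      rw [matchLoopA]
      split_ifs with h1 h2 h3 h4 <;> first | exact ih | rfl | tauto
  · rw [if_neg hw]
    induction sqlClauses with
    | nil => rfl
    | cons a t ih =>
      rw [matchLoopA, findClauseB]
      have hiff := upper_slice_eq_iff sql a i
      by_cases hsw : PySem.Chars.startswith ((PySem.Chars.upper sql).drop i) a = true
      · rw [if_neg (not_not_intro (hiff.mpr hsw))]
        rw [if_neg (by tauto)]
        by_cases hf : i + a.length < sql.length ∧ isWordChar (sql.getD (i + a.length) ' ') = true
        · rw [if_pos hf, if_neg (by tauto)]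
          exact ih
        · rw [if_neg hf, if_neg (by omega), if_pos ⟨hsw, hf⟩]
      · rw [if_pos (fun he => hsw (hiff.mp he)), if_neg (by tauto)]
        exact ih

-- L1: A's loop equals the fused view
theorem loopA_eq_Fspec (sql : List Char) :
    ∀ (m i : Nat) (q : Option Char) (lines : List (List Char)) (cur : List Char),
      sql.length - i ≤ m →
      loopA sql lines cur i q = lines ++ Fspec sql (PySem.Chars.upper sql) cur i q := by
  intro m
  induction m with
  | zero =>
    intro i q lines cur hm
    rw [loopA, Fspec, dif_neg (by omega), dif_neg (by omega)]
    by_cases ht : PySem.Chars.strip cur = [] <;> simp [ht]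
  | succ m ih =>
    intro i q lines cur hm
    by_cases hi : i < sql.length
    · rw [loopA, Fspec, dif_pos hi, dif_pos hi]
      by_cases hc : sql[i] = '\'' ∨ sql[i] = '"'
      · rw [if_pos hc, if_pos hc]
        exact ih (i + 1) _ lines _ (by omega)
      · rw [if_neg hc, if_neg hc]
        by_cases hq : q = none ∧ 0 < i
        · obtain ⟨hq1, hq2⟩ := hq
          subst hq1
          have hAB := matchA_eq sql i hq2
          cases hca : clauseAtB sql (PySem.Chars.upper sql) i with
          | some cl =>
            simp only [hAB, hca, hq2, Option.isSome_some, Option.get_some, dite_true,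
              and_true, if_pos trivial]
            have hpos := clauseAtB_pos sql (PySem.Chars.upper sql) i cl hca
            rw [ih (i + cl.length) none _ _ (by omega)]
            by_cases ht : PySem.Chars.strip cur = [] <;> simp [ht]
          | none =>
            simp only [hAB, hca, hq2, Option.isSome_none, Bool.false_eq_true, dite_false,
              and_true, if_pos trivial]
            exact ih (i + 1) _ lines _ (by omega)
        · rw [if_neg hq]
          have hmA : (if q = none then matchLoopA sql i sqlClauses else none) = none := by
            by_cases hqn : q = none
            · subst hqn
              have h0 : i = 0 := by
                by_contra hne
                exact hq ⟨rfl, by omega⟩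
              subst h0
              rw [if_pos rfl]
              exact matchLoopA_zero sql sqlClauses
            · exact if_neg hqn
          simp only [hmA, Option.isSome_none, Bool.false_eq_true, dite_false]
          exact ih (i + 1) _ lines _ (by omega)
    · rw [loopA, Fspec, dif_neg hi, dif_neg hi]
      by_cases ht : PySem.Chars.strip cur = [] <;> simp [ht]

theorem slice_split (sql : List Char) (i j x : Nat) (hij : i ≤ j) (hjx : j ≤ x) :
    PySem.List.slice sql (some (i : Int)) (some (x : Int)) =
      PySem.List.slice sql (some (i : Int)) (some (j : Int)) ++
        PySem.List.slice sql (some (j : Int)) (some (x : Int)) := by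
  simp only [PySem.List.slice_natCast]
  rw [show x - i = (j - i) + (x - j) from by omega, List.take_add]
  congr 1
  rw [List.drop_drop, show i + (j - i) = j from by omega]

theorem slice_cons (sql : List Char) (i x : Nat) (hi : i < sql.length) (hx : i < x) :
    PySem.List.slice sql (some (i : Int)) (some (x : Int)) =
      sql[i] :: PySem.List.slice sql (some ((i + 1 : Nat) : Int)) (some (x : Int)) := by
  simp only [PySem.List.slice_natCast]
  rw [List.drop_eq_getElem_cons hi, show x - i = (x - (i + 1)) + 1 from by omega,
    List.take_succ_cons]

theorem strip_nil_append (x y : List Char) (h : PySem.Chars.strip x = []) :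
    PySem.Chars.strip (x ++ y) = PySem.Chars.strip y := by
  simp only [PySem.Chars.strip, PySem.Chars.rstrip, PySem.Chars.lstrip] at h ⊢
  rw [List.reverse_eq_nil_iff] at h
  have hds : ∀ c ∈ List.dropWhile PySem.Chars.isspace x, PySem.Chars.isspace c := by
    intro c hc
    exact List.dropWhile_eq_nil_iff.mp h c (by simpa using hc)
  have hall : ∀ c ∈ x, PySem.Chars.isspace c := by
    intro c hc
    rw [← List.takeWhile_append_dropWhile (p := PySem.Chars.isspace) (l := x)] at hc
    rcases List.mem_append.mp hc with h' | h'
    · exact List.mem_takeWhile_imp h'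
    · exact hds c h'
  have hnil : List.dropWhile PySem.Chars.isspace x = [] :=
    List.dropWhile_eq_nil_iff.mpr hall
  rw [List.dropWhile_append, hnil]
  simp

-- a successful scan starts with the clause (so the cut plus the clause fits in sql)
theorem findClauseB_sw (sql upper : List Char) (i : Nat) (L : List (List Char))
    (c : List Char) (h : findClauseB sql upper i L = some c) :
    PySem.Chars.startswith (upper.drop i) c = true := by
  induction L with
  | nil => simp [findClauseB] at h
  | cons a t ih =>
    rw [findClauseB] at h
    split_ifs at h with h1
    · injection h with h'; subst h'; exact h1.1
    · exact ih h

theorem scanB_fits (sql upper : List Char) (hu : upper.length = sql.length) :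
    ∀ (m i : Nat) (q : Option Char) (j : Nat) (q' : Option Char) (cl : List Char),
      sql.length - i ≤ m → scanB sql upper i q = (j, q', some cl) →
      j + cl.length ≤ sql.length := by
  intro m
  induction m with
  | zero =>
    intro i q j q' cl hm h
    rw [scanB, dif_neg (by omega)] at h
    simp at h
  | succ m ih =>
    intro i q j q' cl hm h
    by_cases hi : i < sql.length
    · rw [scanB, dif_pos hi] at h
      by_cases hc : sql[i] = '\'' ∨ sql[i] = '"'
      · rw [if_pos hc] at h
        exact ih (i + 1) _ j q' cl (by omega) h
      · rw [if_neg hc] at h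
        by_cases hq : q = none ∧ 0 < i
        · rw [if_pos hq] at h
          cases hca : clauseAtB sql upper i with
          | some c0 =>
            rw [hca] at h
            injection h with h1 h2
            injection h2 with h2 h3
            injection h3 with h3
            subst h1; subst h3
            unfold clauseAtB at hca
            split_ifs at hca
            have hsw := findClauseB_sw sql upper i sqlClauses c0 hca
            rw [PySem.Chars.startswith_iff] at hsw
            have := hsw.length_le
            simp only [List.length_drop] at this
            omega
          | none =>
            rw [hca] at h
            exact ih (i + 1) _ j q' cl (by omega) h
        · rw [if_neg hq] at h
          exact ih (i + 1) _ j q' cl (by omega) h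
    · rw [scanB, dif_neg hi] at h
      simp at h

-- L2: the fused view characterised by one scanB step
def Fafter (sql upper cur : List Char) (i : Nat)
    (r : Nat × Option Char × Option (List Char)) : List (List Char) :=
  match r with
  | (j, q', some cl) =>
    let t := PySem.Chars.strip (cur ++
      PySem.List.slice sql (some (i : Int)) (some ((j : Nat) : Int)))
    (if t = [] then [] else [t]) ++
      Fspec sql upper
        ((if t = [] then cur ++
            PySem.List.slice sql (some (i : Int)) (some ((j : Nat) : Int)) else []) ++
          PySem.List.slice sql (some ((j : Nat) : Int)) (some ((j + cl.length : Nat) : Int)))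
        (j + cl.length) q'
  | (_, _, none) =>
    let t := PySem.Chars.strip (cur ++
      PySem.List.slice sql (some (i : Int)) (some ((sql.length : Nat) : Int)))
    if t = [] then [] else [t]

-- one consumed character moves from the slice into the accumulator
theorem Fafter_step (sql upper cur : List Char) (i : Nat) (hi : i < sql.length)
    (j : Nat) (q3 : Option Char) (ocl : Option (List Char))
    (hj : ∀ cl, ocl = some cl → i + 1 ≤ j) :
    Fafter sql upper (cur ++ [sql[i]'hi]) (i + 1) (j, q3, ocl) =
      Fafter sql upper cur i (j, q3, ocl) := by
  cases ocl with
  | none =>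
    simp only [Fafter]
    have hsl : cur ++ PySem.List.slice sql (some (i : Int)) (some ((sql.length : Nat) : Int)) =
        (cur ++ [sql[i]'hi]) ++
          PySem.List.slice sql (some ((i + 1 : Nat) : Int)) (some ((sql.length : Nat) : Int)) := by
      rw [slice_cons sql i sql.length hi hi]
      simp
    rw [hsl]
  | some cl =>
    have hij : i + 1 ≤ j := hj cl rfl
    have hsl : cur ++ PySem.List.slice sql (some (i : Int)) (some ((j : Nat) : Int)) =
        (cur ++ [sql[i]'hi]) ++
          PySem.List.slice sql (some ((i + 1 : Nat) : Int)) (some ((j : Nat) : Int)) := by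
      rw [slice_cons sql i j hi (by omega)]
      simp
    simp only [Fafter]
    rw [hsl]

theorem Fspec_scan (sql upper : List Char) :
    ∀ (m i : Nat) (q : Option Char) (cur : List Char), sql.length - i ≤ m →
      Fspec sql upper cur i q = Fafter sql upper cur i (scanB sql upper i q) := by
  intro m
  induction m with
  | zero =>
    intro i q cur hm
    rw [Fspec, scanB, dif_neg (by omega), dif_neg (by omega)]
    simp only [Fafter]
    have hsl : PySem.List.slice sql (some (i : Int)) (some ((sql.length : Nat) : Int)) = [] := by
      rw [PySem.List.slice_natCast, List.drop_eq_nil_of_le (by omega)]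
      simp
    rw [hsl, List.append_nil]
  | succ m ih =>
    intro i q cur hm
    by_cases hi : i < sql.length
    · by_cases hc : sql[i]'hi = '\'' ∨ sql[i]'hi = '"'
      · obtain ⟨q2, hq2⟩ : ∃ q2, (match q with
             | none => some (sql[i]'hi)
             | some c => if c = sql[i]'hi then none else some c : Option Char) = q2 :=
          ⟨_, rfl⟩
        have hsc : scanB sql upper i q = scanB sql upper (i + 1) q2 := by
          rw [scanB, dif_pos hi, if_pos hc, hq2]
        have hF : Fspec sql upper cur i q =
            Fspec sql upper (cur ++ [sql[i]'hi]) (i + 1) q2 := by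
          rw [Fspec, dif_pos hi, if_pos hc, hq2]
        rw [hF, hsc, ih (i + 1) q2 _ (by omega)]
        rcases hsb : scanB sql upper (i + 1) q2 with ⟨j, q3, ocl⟩
        exact Fafter_step sql upper cur i hi j q3 ocl (fun cl hcl => by
          subst hcl
          have := scanB_some sql upper (sql.length - (i + 1)) (i + 1) q2 j q3 cl (le_refl _) hsb
          omega)
      · by_cases hq : q = none ∧ 0 < i
        · obtain ⟨hq1, hq2⟩ := hq
          subst hq1
          cases hca : clauseAtB sql upper i with
          | some cl =>
            have hsc : scanB sql upper i none = (i, none, some cl) := by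
              rw [scanB, dif_pos hi, if_neg hc, if_pos ⟨rfl, hq2⟩, hca]
            rw [hsc, Fspec]
            simp only [dif_pos hi, hq2, and_true, if_pos trivial, if_neg hc, Fafter]
            have hii : PySem.List.slice sql (some (i : Int)) (some ((i : Nat) : Int)) = [] := by
              rw [PySem.List.slice_natCast]
              simp
            rw [hii, List.append_nil]
            split
            · rename_i cl' hcl'
              rw [hca] at hcl'
              injection hcl' with he
              subst he
              rfl
            · rename_i hcl'
              rw [hca] at hcl'
              simp at hcl'
          | none =>
            have hsc : scanB sql upper i none = scanB sql upper (i + 1) none := by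
              rw [scanB, dif_pos hi, if_neg hc, if_pos ⟨rfl, hq2⟩, hca]
            have hF : Fspec sql upper cur i none =
                Fspec sql upper (cur ++ [sql[i]'hi]) (i + 1) none := by
              rw [Fspec, dif_pos hi, if_neg hc, if_pos ⟨rfl, hq2⟩, hca]
            rw [hF, hsc, ih (i + 1) none _ (by omega)]
            rcases hsb : scanB sql upper (i + 1) none with ⟨j, q3, ocl⟩
            exact Fafter_step sql upper cur i hi j q3 ocl (fun cl hcl => by
              subst hcl
              have := scanB_some sql upper (sql.length - (i + 1)) (i + 1) none j q3 cl
                (le_refl _) hsb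
              omega)
        · have hsc : scanB sql upper i q = scanB sql upper (i + 1) q := by
            rw [scanB, dif_pos hi, if_neg hc, if_neg hq]
          have hF : Fspec sql upper cur i q =
              Fspec sql upper (cur ++ [sql[i]'hi]) (i + 1) q := by
            rw [Fspec, dif_pos hi, if_neg hc, if_neg hq]
          rw [hF, hsc, ih (i + 1) q _ (by omega)]
          rcases hsb : scanB sql upper (i + 1) q with ⟨j, q3, ocl⟩
          exact Fafter_step sql upper cur i hi j q3 ocl (fun cl hcl => by
            subst hcl
            have := scanB_some sql upper (sql.length - (i + 1)) (i + 1) q j q3 cl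
              (le_refl _) hsb
            omega)
    · rw [Fspec, scanB, dif_neg hi, dif_neg hi]
      simp only [Fafter]
      have hsl : PySem.List.slice sql (some (i : Int)) (some ((sql.length : Nat) : Int)) = [] := by
        rw [PySem.List.slice_natCast, List.drop_eq_nil_of_le (by omega)]
        simp
      rw [hsl, List.append_nil]

-- L3: B's outer loop equals the fused view (modulo a stripped-away whitespace prefix)
theorem outerB_eq_Fspec (sql upper : List Char) (hu : upper.length = sql.length) :
    ∀ (m i : Nat) (q : Option Char) (lines : List (List Char)) (start : Nat)
      (w : List Char), sql.length - i ≤ m → PySem.Chars.strip w = [] → start ≤ i →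
      i ≤ sql.length →
      outerB sql upper lines start i q =
        lines ++ Fspec sql upper
          (w ++ PySem.List.slice sql (some (start : Int)) (some (i : Int))) i q := by
  intro m
  induction m with
  | zero =>
    intro i q lines start w hm hw hsi hin
    have hieq : i = sql.length := by omega
    subst hieq
    rw [Fspec_scan sql upper 0 sql.length q _ (by omega), outerB]
    have hsc : scanB sql upper sql.length q = (sql.length, q, none) := by
      rw [scanB, dif_neg (by omega)]
    rw [hsc]
    simp only [Fafter]
    rw [List.append_assoc, ← slice_split sql start sql.length sql.length hsi (le_refl _),
      strip_nil_append w _ hw, PySem.List.slice_natCast, PySem.List.slice_from_natCast,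
      List.take_of_length_le (by simp)]
    by_cases ht : PySem.Chars.strip (sql.drop start) = [] <;> simp [ht]
  | succ m ih =>
    intro i q lines start w hm hw hsi hin
    rw [Fspec_scan sql upper (sql.length - i) i q _ (le_refl _), outerB]
    rcases hsb : scanB sql upper i q with ⟨j, q3, ocl⟩
    cases ocl with
    | none =>
      simp only [Fafter]
      rw [List.append_assoc, ← slice_split sql start i sql.length hsi hin,
        strip_nil_append w _ hw, PySem.List.slice_natCast, PySem.List.slice_from_natCast,
        List.take_of_length_le (by simp)]
      by_cases ht : PySem.Chars.strip (sql.drop start) = [] <;> simp [ht]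
    | some cl =>
      obtain ⟨hij, hjn, hcl⟩ :=
        scanB_some sql upper (sql.length - i) i q j q3 cl (le_refl _) hsb
      have hfit := scanB_fits sql upper hu (sql.length - i) i q j q3 cl (le_refl _) hsb
      simp only [Fafter]
      have hjoin : (w ++ PySem.List.slice sql (some (start : Int)) (some (i : Int))) ++
          PySem.List.slice sql (some (i : Int)) (some ((j : Nat) : Int)) =
          w ++ PySem.List.slice sql (some (start : Int)) (some ((j : Nat) : Int)) := by
        rw [List.append_assoc, ← slice_split sql start i j hsi hij]
      have hseg : PySem.Chars.strip
          ((w ++ PySem.List.slice sql (some (start : Int)) (some (i : Int))) ++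
            PySem.List.slice sql (some (i : Int)) (some ((j : Nat) : Int))) =
          PySem.Chars.strip (PySem.List.slice sql (some (start : Int)) (some ((j : Nat) : Int))) := by
        rw [hjoin, strip_nil_append w _ hw]
      rw [hseg, hjoin]
      set seg := PySem.Chars.strip
        (PySem.List.slice sql (some (start : Int)) (some ((j : Nat) : Int))) with hsegdef
      have hw' : PySem.Chars.strip
          (if seg = [] then w ++ PySem.List.slice sql (some (start : Int)) (some ((j : Nat) : Int))
           else []) = [] := by
        by_cases hs0 : seg = []
        · rw [if_pos hs0, strip_nil_append w _ hw, ← hsegdef, hs0]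
        · rw [if_neg hs0]
          simp [PySem.Chars.strip, PySem.Chars.rstrip, PySem.Chars.lstrip]
      rw [dif_pos (by omega : sql.length - (j + cl.length) < sql.length - i)]
      rw [ih (j + cl.length) q3 _ j _ (by omega) hw' (by omega) (by omega)]
      by_cases hs0 : seg = [] <;> simp [hs0]

-- ===== VERDICT (by name: the statement is the Claim_ definition above) =====
theorem break_sql_clauses_py_spec : Claim_equal_break_sql_clauses_py := by
  intro sql _
  unfold Spec_break_sql_clauses_py
  simp only [break_sql_clauses_py, break_sql_clauses_py_alt]
  rw [loopA_eq_Fspec sql.toList sql.toList.length 0 none [] [] (by omega)]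
  rw [outerB_eq_Fspec sql.toList (PySem.Chars.upper sql.toList)
    (by simp [PySem.Chars.upper]) sql.toList.length 0 none [] 0 [] (by omega)
    (by simp [PySem.Chars.strip, PySem.Chars.rstrip, PySem.Chars.lstrip]) (le_refl _) (by omega)]
  have hsl : PySem.List.slice sql.toList (some ((0 : Nat) : Int)) (some ((0 : Nat) : Int)) = [] := by
    rw [PySem.List.slice_natCast]
    simp
  rw [hsl]
  simp
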